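-- pv_equiv track=rewrite | github.com/Jackpot0815/SWP_RUBNER | poker.py | check_pair
-- ===== SOURCE A (Python) =====
-- from collections import Counter
--
-- def check_pair(hand):
--     werteliste = []
--     for x in range(5):
--         for h in hand:
--             k = h[x].split()
--             kw = k[0]
--             werteliste.append(kw)
--         counter = Counter(werteliste)
--         result = [i for i, j in counter.items() if j == 2]  # checkt wie oft ein element in einem array vorkommen und
--     if len(result) == 1:  # speichert das ergebnis in einem dictionary -> das wird durch gefilltert
--         return True  # kommt ein element 2 mal vor haben wir ein paar
--     else:
--         return False
-- ===== SOURCE B (Python) =====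
-- def check_pair(hand):
--     # sort the 25 first-tokens, then scan consecutive runs and count runs of length 2
--     tokens = sorted(h[x].split()[0] for x in range(5) for h in hand)
--     pairs = 0
--     i, n = 0, len(tokens)
--     while i < n:
--         j = i + 1
--         while j < n and tokens[j] == tokens[i]:
--             j += 1
--         if j - i == 2:
--             pairs += 1
--         i = j
--     return pairs == 1
-- ===== Notes on version B (the rewrite author's own statement) =====
-- stated objective: alternative
-- what changed: B replaces A's hash-table frequency count (Counter rebuilt inside the loop, then filtered for multiplicity 2) by a sort-then-scan: it sorts the flat token list once and counts consecutive equal runs of length exactly 2.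
import Mathlib
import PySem

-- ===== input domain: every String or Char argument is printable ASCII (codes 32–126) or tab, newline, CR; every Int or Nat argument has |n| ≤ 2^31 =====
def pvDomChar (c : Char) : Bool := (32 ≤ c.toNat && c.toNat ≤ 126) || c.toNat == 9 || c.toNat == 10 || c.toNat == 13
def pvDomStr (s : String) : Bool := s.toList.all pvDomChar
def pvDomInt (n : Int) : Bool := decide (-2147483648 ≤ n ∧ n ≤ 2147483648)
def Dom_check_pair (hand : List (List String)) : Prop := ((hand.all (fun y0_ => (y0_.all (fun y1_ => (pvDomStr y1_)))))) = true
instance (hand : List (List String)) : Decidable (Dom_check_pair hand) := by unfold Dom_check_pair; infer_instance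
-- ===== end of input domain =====

-- B sorts the flat token list once and counts consecutive equal runs of length 2, instead of A's Counter; same return value on Pre_.

-- ===== PORT A =====
-- h[x].split()[0]  (the .getD defaults are unreachable under Pre_check_pair, which excludes the IndexErrors)
def pvTok (x : Int) (h : List String) : String :=
  (PySem.List.pyGet? (PySem.Str.split₀ ((PySem.List.pyGet? h x).getD "")) 0).getD ""

def check_pair (hand : List (List String)) : Bool :=
  -- state: (werteliste, result); result is recomputed (overwritten) on every x
  let st := (PySem.List.pyRange 0 5 1).foldl
    (fun (st : List String × List String) x =>
      let w := hand.foldl (fun w h =>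
        let k := PySem.Str.split₀ ((PySem.List.pyGet? h x).getD "")
        let kw := (PySem.List.pyGet? k 0).getD ""
        w ++ [kw]) st.1
      let counter := PySem.Dict.counter w
      let result := (counter.items.filter (fun p => p.2 == 2)).map (fun p => p.1)
      (w, result))
    ([], [])
  decide (st.2.length = 1)

-- ===== PORT B =====
-- the index-based run scan of Source B, as structural recursion on the sorted list:
-- one step consumes the whole run of the head element and adds 1 iff the run has length 2
def runPairs : List String → Nat
  | [] => 0
  | x :: rest =>
      (if (rest.takeWhile (· == x)).length + 1 = 2 then 1 else 0) +
        runPairs (rest.dropWhile (· == x))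
termination_by m => m.length
decreasing_by
  have := List.length_dropWhile_le (· == x) rest
  simp only [List.length_cons]
  omega

def check_pair_alt (hand : List (List String)) : Bool :=
  let tokens := PySem.List.sorted
    ((PySem.List.pyRange 0 5 1).flatMap (fun x => hand.map (pvTok x))) (fun s => s) false
  runPairs tokens == 1

-- ===== PRECONDITION & SPEC =====
-- Pre_ excludes exactly the inputs where A raises: a hand row shorter than 5 (IndexError on h[x])
-- or a row entry among the first 5 that is all-whitespace (IndexError on .split()[0]).
def Pre_check_pair (hand : List (List String)) : Prop :=
  ∀ h ∈ hand, 5 ≤ h.length ∧ ∀ s ∈ h.take 5, PySem.Str.split₀ s ≠ []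
instance (hand : List (List String)) : Decidable (Pre_check_pair hand) := by
  unfold Pre_check_pair; infer_instance

def pvWitness_check_pair : List (List String) :=
  [["2h", "2s", "3d", "4c", "5h"], ["7h", "8s", "9d", "Tc", "Jh"]]

def Spec_check_pair (hand : List (List String)) (out : Bool) : Prop := out = check_pair_alt hand
instance (hand : List (List String)) (out : Bool) : Decidable (Spec_check_pair hand out) := by
  unfold Spec_check_pair; infer_instance

-- ===== CLAIM (what is proved, stated in full; the proofs are below) =====
def Claim_equal_check_pair : Prop :=
  ∀ (hand : List (List String)), Dom_check_pair hand → Pre_check_pair hand →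
    Spec_check_pair hand (check_pair hand)

-- ===== LEMMAS AND PROOFS =====

-- the run scan of B on a sorted list m counts, against any duplicate-free enumeration u
-- of m's values, the values of multiplicity exactly 2
theorem runPairs_spec (m : List String) (u : List String)
    (hs : m.Pairwise (· ≤ ·)) (hu : u.Nodup) (hmem : ∀ v, v ∈ u ↔ v ∈ m) :
    runPairs m = (u.filter (fun v => m.count v == 2)).length := by
  induction m using runPairs.induct generalizing u with
  | case1 =>
      have : u = [] := by
        cases u with
        | nil => rfl
        | cons a t => exact absurd ((hmem a).1 (by simp)) (by simp)
      subst this; simp [runPairs]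
  | case2 x rest ih =>
      set run := rest.takeWhile (· == x) with hrundef
      set rem := rest.dropWhile (· == x) with hremdef
      have hsplit : run ++ rem = rest := List.takeWhile_append_dropWhile
      have hrestP : rest.Pairwise (· ≤ ·) := (List.pairwise_cons.1 hs).2
      have hxle : ∀ a ∈ rest, x ≤ a := (List.pairwise_cons.1 hs).1
      have hrun : ∀ a ∈ run, a = x := by
        intro a ha
        have := List.mem_takeWhile_imp ha
        simpa [eq_comm] using of_decide_eq_true this
      have hremP : rem.Pairwise (· ≤ ·) :=
        hrestP.sublist (List.dropWhile_sublist _)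
      have hxnrem : x ∉ rem := by
        intro hx
        cases hrem : rem with
        | nil => simp [hrem] at hx
        | cons y t =>
          have hy : (y == x) = false := by
            have := List.head_dropWhile_not (· == x) (l := rest)
              (by rw [← hremdef, hrem]; simp)
            simpa [← hremdef, hrem] using this
          have hyx : y ≠ x := by simpa using hy
          have hymem : y ∈ rest := by
            have : y ∈ rem := by simp [hrem]
            exact (List.dropWhile_sublist _).mem this
          have h1 : x ≤ y := hxle y hymem
          have h2 : y ≤ x := by
            rw [hrem] at hx
            rcases List.mem_cons.1 hx with h | h
            · exact le_of_eq h.symm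
            · have := (List.pairwise_cons.1 (hrem ▸ hremP)).1
              exact this x h
          exact hyx (le_antisymm h2 h1)
      have hcountx : (x :: rest).count x = run.length + 1 := by
        rw [← hsplit]
        have h1 : run.count x = run.length :=
          List.count_eq_length.2 (fun b hb => by simp [hrun b hb])
        have h2 : rem.count x = 0 := List.count_eq_zero.2 hxnrem
        simp [List.count_append, h1, h2]
      have hcountv : ∀ v, v ≠ x → (x :: rest).count v = rem.count v := by
        intro v hv
        rw [← hsplit]
        have h1 : run.count v = 0 :=
          List.count_eq_zero.2 (fun hvr => hv (hrun v hvr))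
        simp [List.count_append, h1, Ne.symm hv]
      have hxu : x ∈ u := (hmem x).2 (by simp)
      have hperm : u.Perm (x :: u.erase x) := List.perm_cons_erase hxu
      have hmem' : ∀ v, v ∈ u.erase x ↔ v ∈ rem := by
        intro v
        constructor
        · intro hv
          have h1 := (hu.mem_erase_iff).1 hv
          have h2 : v ∈ x :: rest := (hmem v).1 h1.2
          rcases List.mem_cons.1 h2 with h | h
          · exact absurd h h1.1
          · rw [← hsplit] at h
            rcases List.mem_append.1 h with h | h
            · exact absurd (hrun v h) h1.1
            · exact h
        · intro hv
          have hvx : v ≠ x := fun h => hxnrem (h ▸ hv)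
          refine (hu.mem_erase_iff).2 ⟨hvx, (hmem v).2 ?_⟩
          exact List.mem_cons.2 (Or.inr (hsplit ▸ List.mem_append.2 (Or.inr hv)))
      have hlen : (u.filter (fun v => (x :: rest).count v == 2)).length
          = ((x :: u.erase x).filter (fun v => (x :: rest).count v == 2)).length :=
        (hperm.filter _).length_eq
      have hcongr : (u.erase x).filter (fun v => (x :: rest).count v == 2)
          = (u.erase x).filter (fun v => rem.count v == 2) := by
        apply List.filter_congr
        intro v hv
        have hvx : v ≠ x := ((hu.mem_erase_iff).1 hv).1
        rw [hcountv v hvx]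
      have hih := ih (u.erase x) hremP (hu.erase x) hmem'
      rw [runPairs, hlen]
      have hb : ((run.length + 1 : Nat) == 2) = decide (run.length + 1 = 2) := by
        by_cases h2 : run.length + 1 = 2 <;> simp [h2] <;> omega
      simp only [List.filter_cons, hcountx, hcongr, hih, ← hremdef, ← hrundef, hb]
      by_cases h2 : run.length + 1 = 2 <;> simp [h2] <;> omega

-- the two ports agree on every input (A's exceptions are excluded by Pre_check_pair on the Python side)
theorem check_pair_spec' (hand : List (List String)) :
    check_pair hand = check_pair_alt hand := by
  have hr : PySem.List.pyRange 0 5 1 = [0, 1, 2, 3, 4] := by decide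
  have hW : ∀ x pre, hand.foldl (fun w h =>
      w ++ [(PySem.List.pyGet? (PySem.Str.split₀ ((PySem.List.pyGet? h x).getD "")) 0).getD ""]) pre
      = pre ++ hand.map (pvTok x) := by
    intro x pre
    exact PySem.List.foldl_append_singleton_eq_map (f := pvTok x) (l := hand) (acc := pre)
  set W : List String := (PySem.List.pyRange 0 5 1).flatMap (fun x => hand.map (pvTok x)) with hWdef
  have hA : check_pair hand
      = decide ((((PySem.Dict.counter W).items.filter (fun p => p.2 == 2)).map (fun p => p.1)).length = 1) := by
    simp only [check_pair, hr, hWdef, List.foldl, hW, List.flatMap_cons, List.flatMap_nil,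
      List.nil_append, List.append_nil, List.append_assoc]
  rw [hA]
  set m : List String := PySem.List.sorted W (fun s => s) false with hmdef
  have hB : check_pair_alt hand = (runPairs m == 1) := rfl
  rw [hB]
  have hperm : m.Perm W := PySem.List.sorted_perm W (fun s => s) false
  have hrp : runPairs m = ((PySem.Set.ofList W).filter (fun v => W.count v == 2)).length := by
    have hs : m.Pairwise (· ≤ ·) := by
      simpa using PySem.List.sorted_pairwise (xs := W) (key := fun s => s)
    have h := runPairs_spec m (PySem.Set.ofList W) hs (PySem.Set.nodup_ofList W)
      (fun v => by simp [PySem.Set.mem_ofList, PySem.List.mem_sorted, hmdef])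
    rw [h]
    apply congrArg
    apply List.filter_congr
    intro v _
    rw [hperm.count_eq]
  have hitems : (PySem.Dict.counter W).items
      = (PySem.Set.ofList W).map (fun k => (k, (W.count k : Int))) := PySem.Dict.items_counter W
  have hcast : ∀ n : Nat, (((n : Int)) == (2 : Int)) = (n == 2) := by
    intro n
    by_cases h : n = 2
    · simp [h]
    · simp [h]
      omega
  rw [hitems, List.filter_map, List.map_map]
  simp only [Function.comp_def, hcast, List.length_map]
  rw [hrp] at *
  by_cases h1 : ((PySem.Set.ofList W).filter (fun v => W.count v == 2)).length = 1 <;> simp [h1]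

-- ===== VERDICT (by name: the statement is the Claim_ definition above) =====
theorem check_pair_spec : Claim_equal_check_pair := by
  intro hand _ _
  exact check_pair_spec' hand
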